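-- pv_equiv track=rewrite | github.com/JeakeG/AnagramSolver | anagram/AnagramEngine.py | getRemainingLetters
-- ===== SOURCE A (Python) =====
-- def getRemainingLetters(letters, word):
--     remainingLetters = letters
--     for char in word:  # iterates through each character of word
--         try:
--             charIndex = remainingLetters.index(char)
--         except ValueError:  # did not find letter in remaining anagram letters
--             return None  # returns nothing
--         remainingLetters = remainingLetters[:charIndex] + remainingLetters[charIndex + 1:]  # removes character if found
--     return remainingLetters  # returns remaining letters after removing word
-- ===== SOURCE B (Python) =====
-- def getRemainingLetters(letters, word):
--     need = {}
--     for c in word: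
--         need[c] = need.get(c, 0) + 1
--     out = []
--     for c in letters:
--         k = need.get(c, 0)
--         if k != 0:
--             need[c] = k - 1
--         else:
--             out.append(c)
--     if any(v != 0 for v in need.values()):
--         return None
--     return "".join(out)
-- ===== Notes on version B (the rewrite author's own statement) =====
-- stated objective: faster
-- what changed: Replaces the per-character .index scan and string re-slicing with a one-pass character-count dictionary over word followed by a single pass over letters that skips still-needed characters, checking leftover counts at the end.
import Mathlib
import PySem

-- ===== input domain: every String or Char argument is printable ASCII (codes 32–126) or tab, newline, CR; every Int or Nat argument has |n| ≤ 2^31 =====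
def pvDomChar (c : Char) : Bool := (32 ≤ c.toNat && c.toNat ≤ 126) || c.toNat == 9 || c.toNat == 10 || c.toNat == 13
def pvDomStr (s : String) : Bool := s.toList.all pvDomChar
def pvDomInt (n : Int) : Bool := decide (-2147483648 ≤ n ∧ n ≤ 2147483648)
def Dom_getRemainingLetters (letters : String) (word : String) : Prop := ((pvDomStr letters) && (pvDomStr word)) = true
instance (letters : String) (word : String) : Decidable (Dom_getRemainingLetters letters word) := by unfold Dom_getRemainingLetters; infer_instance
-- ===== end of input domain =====

-- B replaces A's per-character .index scan + string re-slicing by a counting dictionary and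
-- a single pass over letters (asymptotically faster); proved to return the same Option value.

-- ===== PORT A =====
-- A's loop over word: find the first index of char in the remaining letters (ValueError → None),
-- then remove it by slicing remaining[:i] + remaining[i+1:].
def goA : List Char → List Char → Option (List Char)
  | rem, [] => some rem
  | rem, c :: w =>
      match PySem.List.index? rem c with
      | none => none
      | some i =>
          goA (PySem.List.slice rem none (some (i : Int)) ++
               PySem.List.slice rem (some ((i : Int) + 1)) none) w

def getRemainingLetters (letters : String) (word : String) : Option String :=
  (goA letters.toList word.toList).map String.ofList

-- ===== PORT B =====
-- second loop of Source B: state is (need, out)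
def goB : List Char → PySem.Dict Char Int → List Char → PySem.Dict Char Int × List Char
  | [], need, out => (need, out)
  | c :: rest, need, out =>
      let k := need.getD c 0
      if k ≠ 0 then goB rest (need.insert c (k - 1)) out
      else goB rest need (out ++ [c])

def getRemainingLetters_alt (letters : String) (word : String) : Option String :=
  let need := word.toList.foldl (fun d c => d.insert c (d.getD c 0 + 1)) PySem.Dict.empty
  let r := goB letters.toList need []
  if (PySem.Dict.values r.1).any (fun v => decide (v ≠ 0)) then none
  else some (String.ofList r.2)

-- ===== PRECONDITION & SPEC =====
def Spec_getRemainingLetters (letters : String) (word : String) (out : Option String) : Prop := out = getRemainingLetters_alt letters word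
instance (letters : String) (word : String) (out : Option String) : Decidable (Spec_getRemainingLetters letters word out) := by unfold Spec_getRemainingLetters; infer_instance

-- ===== CLAIM (what is proved, stated in full; the proofs are below) =====
def Claim_equal_getRemainingLetters : Prop := ∀ (letters : String) (word : String), Dom_getRemainingLetters letters word → Spec_getRemainingLetters letters word (getRemainingLetters letters word)

-- ===== LEMMAS AND PROOFS =====

-- F s g: the letters of s that survive when, scanning left to right, each char c still
-- "needed" (g c > 0) is skipped and its budget decremented.
def F : List Char → (Char → Nat) → List Char
  | [], _ => []
  | a :: s, g => if g a = 0 then a :: F s g else F s (fun d => if d = a then g d - 1 else g d)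

-- G s g: the leftover budgets after that scan.
def G : List Char → (Char → Nat) → Char → Nat
  | [], g => g
  | a :: s, g => if g a = 0 then G s g else G s (fun d => if d = a then g d - 1 else g d)

theorem F_zero (s : List Char) : F s (fun _ => 0) = s := by
  induction s with
  | nil => rfl
  | cons a s ih => simp [F, ih]

theorem F_erase : ∀ (s : List Char) (g : Char → Nat) (c : Char), c ∈ s →
    F (s.erase c) g = F s (fun d => if d = c then g d + 1 else g d) := by
  intro s
  induction s with
  | nil => intro g c h; simp at h
  | cons a s ih =>
    intro g c hc
    by_cases hac : a = c
    · subst hac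
      rw [List.erase_cons_head]
      have hstep : F (a :: s) (fun d => if d = a then g d + 1 else g d)
          = F s (fun d => if d = a then (if d = a then g d + 1 else g d) - 1 else (if d = a then g d + 1 else g d)) := by
        simp only [F]; rw [if_neg (by simp)]
      rw [hstep]
      congr 1
      funext d; by_cases hd : d = a <;> simp [hd]
    · have hcs : c ∈ s := by
        rcases List.mem_cons.mp hc with h | h
        · exact absurd h.symm hac
        · exact h
      rw [List.erase_cons_tail (by simp [hac])]
      simp only [F]
      have hga : (if a = c then g a + 1 else g a) = g a := by simp [hac]
      rw [hga]
      by_cases h0 : g a = 0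
      · rw [if_pos h0, if_pos h0, ih g c hcs]
      · rw [if_neg h0, if_neg h0, ih _ c hcs]
        congr 1
        funext d
        by_cases hd : d = c
        · subst hd; simp [(Ne.symm hac : d ≠ a)]
        · by_cases hda : d = a <;> simp [hd, hda, hac]

theorem G_eq : ∀ (s : List Char) (g : Char → Nat) (c : Char), G s g c = g c - s.count c := by
  intro s
  induction s with
  | nil => intro g c; simp [G]
  | cons a s ih =>
    intro g c
    simp only [G]
    rw [List.count_cons]
    by_cases h0 : g a = 0
    · rw [if_pos h0, ih]
      rcases eq_or_ne a c with h | h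
      · subst h; simp [h0]
      · simp [h]
    · rw [if_neg h0, ih]
      rcases eq_or_ne a c with h | h
      · subst h; simp; omega
      · simp [h, Ne.symm h]

-- A's removal step is List.erase
theorem slice_eq_erase (rem : List Char) (c : Char) (i : Nat)
    (h : PySem.List.index? rem c = some i) :
    PySem.List.slice rem none (some (i : Int)) ++ PySem.List.slice rem (some ((i : Int) + 1)) none
      = rem.erase c := by
  rcases (PySem.List.index?_eq_some_iff rem c i).mp h with ⟨pre, suf, hrem, hlen, hnot⟩
  subst hrem
  rw [PySem.List.slice_to_natCast]
  have : ((i : Int) + 1) = ((i + 1 : Nat) : Int) := by push_cast; ring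
  rw [this, PySem.List.slice_from_natCast]
  subst hlen
  have hdrop : (pre ++ c :: suf).drop (pre.length + 1) = suf := by
    rw [show pre ++ c :: suf = (pre ++ [c]) ++ suf from by simp,
        show pre.length + 1 = (pre ++ [c]).length from by simp]
    exact List.drop_left
  rw [List.take_left, hdrop, List.erase_append_right _ (by simpa using hnot), List.erase_cons_head]

-- characterization of A's loop
theorem goA_some : ∀ (w rem : List Char), (∀ c ∈ w, w.count c ≤ rem.count c) →
    goA rem w = some (F rem (fun c => w.count c)) := by
  intro w
  induction w with
  | nil => intro rem _; simp [goA]; exact (F_zero rem).symm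
  | cons c w ih =>
    intro rem hcond
    have hc : c ∈ rem := by
      have := hcond c (List.mem_cons_self)
      rw [List.count_cons_self] at this
      exact List.count_pos_iff.mp (by omega)
    simp only [goA]
    obtain ⟨i, hi⟩ : ∃ i, PySem.List.index? rem c = some i := by
      cases hidx : PySem.List.index? rem c with
      | none => exact absurd ((PySem.List.index?_eq_none_iff rem c).mp hidx) (by simpa using hc)
      | some i => exact ⟨i, rfl⟩
    rw [hi]
    simp only
    rw [slice_eq_erase rem c i hi]
    rw [ih (rem.erase c) (by
      intro d hd
      have h1 := hcond d (List.mem_cons_of_mem c hd)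
      rw [List.count_cons] at h1
      rw [List.count_erase]
      revert h1
      split <;> omega)]
    rw [F_erase rem (fun c => List.count c w) c hc]
    have hfun : (fun d => if d = c then List.count d w + 1 else List.count d w)
        = (fun d => List.count d (c :: w)) := by
      funext d
      rw [List.count_cons]
      rcases eq_or_ne d c with h | h
      · subst h; simp
      · simp [h, Ne.symm h]
    rw [hfun]

theorem goA_none : ∀ (w rem : List Char), ¬ (∀ c ∈ w, w.count c ≤ rem.count c) →
    goA rem w = none := by
  intro w
  induction w with
  | nil => intro rem h; exact absurd (by simp) h
  | cons c w ih =>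
    intro rem hcond
    simp only [goA]
    cases hidx : PySem.List.index? rem c with
    | none => rfl
    | some i =>
      simp only
      rw [slice_eq_erase rem c i hidx]
      have hc : c ∈ rem := by
        by_contra hno
        rw [(PySem.List.index?_eq_none_iff rem c).mpr hno] at hidx
        cases hidx
      have hcr : 0 < rem.count c := List.count_pos_iff.mpr hc
      apply ih
      intro hall
      apply hcond
      intro d hd
      rw [List.count_cons]
      rcases List.mem_cons.mp hd with h | hdw
      · subst h
        have h3' : List.count d w + 1 ≤ List.count d rem := by
          by_cases hcw : d ∈ w
          · have h3 := hall d hcw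
            rw [List.count_erase] at h3
            simp at h3
            omega
          · rw [List.count_eq_zero_of_not_mem hcw]; omega
        simpa using h3'
      · have h3 := hall d hdw
        rw [List.count_erase] at h3
        rcases eq_or_ne c d with h | h
        · subst h
          simp at h3 ⊢
          omega
        · simp [h] at h3 ⊢
          omega

-- B's loop, abstracted through the getD view of the dictionary
theorem goB_eq : ∀ (s : List Char) (d : PySem.Dict Char Int) (g : Char → Nat) (out : List Char),
    (∀ c, d.getD c 0 = (g c : Int)) →
    (goB s d out).2 = out ++ F s g ∧
    (∀ c, (goB s d out).1.getD c 0 = (G s g c : Int)) ∧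
    (goB s d out).1.keys = d.keys := by
  intro s
  induction s with
  | nil => intro d g out h; exact ⟨by simp [goB, F], by simpa [goB, G] using h, rfl⟩
  | cons a s ih =>
    intro d g out h
    simp only [goB, F, G]
    by_cases h0 : g a = 0
    · have hk : d.getD a 0 = 0 := by rw [h a, h0]; rfl
      simp only [hk, ne_eq, not_true_eq_false, if_false, if_pos h0]
      simpa using ih d g (out ++ [a]) h
    · have hk : d.getD a 0 ≠ 0 := by rw [h a]; exact_mod_cast h0
      simp only [hk, ne_eq, not_false_eq_true, if_true, if_neg h0]
      have hcont : d.contains a = true := by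
        by_contra hc
        exact hk (PySem.Dict.getD_of_not_contains d 0 (by simpa using hc))
      have hstep : ∀ c, (d.insert a (d.getD a 0 - 1)).getD c 0
          = (((fun d' => if d' = a then g d' - 1 else g d') c : Nat) : Int) := by
        intro c
        rw [PySem.Dict.getD_insert]
        by_cases hca : c = a
        · subst hca; simp [h c]; omega
        · simp [hca, h c]
      rcases ih (d.insert a (d.getD a 0 - 1)) _ out hstep with ⟨h1, h2, h3⟩
      exact ⟨h1, h2, by rw [h3, PySem.Dict.keys_insert_of_contains d _ hcont]⟩

-- the counting loop of Source B is PySem's counter (definitional)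
theorem need_getD (w : List Char) (c : Char) :
    (w.foldl (fun d c => d.insert c (d.getD c 0 + 1)) PySem.Dict.empty).getD c 0 = (w.count c : Int) := by
  rw [PySem.Dict.foldl_insert_getD_add_one_eq_counter, PySem.Dict.getD_counter]

theorem alt_eq (letters word : String) :
    getRemainingLetters_alt letters word =
      if ∀ c ∈ word.toList, word.toList.count c ≤ letters.toList.count c
      then some (String.ofList (F letters.toList (fun c => word.toList.count c)))
      else none := by
  unfold getRemainingLetters_alt
  dsimp only
  set w := word.toList
  set lt := letters.toList
  have hneed : ∀ c, (w.foldl (fun d c => d.insert c (d.getD c 0 + 1)) PySem.Dict.empty).getD c 0 = ((w.count c : Nat) : Int) :=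
    fun c => need_getD w c
  rcases goB_eq lt _ (fun c => w.count c) [] hneed with ⟨h1, h2, h3⟩
  have hkeys : (goB lt (w.foldl (fun d c => d.insert c (d.getD c 0 + 1)) PySem.Dict.empty) []).1.keys
      = (PySem.Dict.counter w).keys := by
    rw [h3, PySem.Dict.foldl_insert_getD_add_one_eq_counter]
  have hnodup : (goB lt (w.foldl (fun d c => d.insert c (d.getD c 0 + 1)) PySem.Dict.empty) []).1.keys.Nodup := by
    rw [hkeys]; exact PySem.Dict.nodup_keys_counter w
  have hvals : (PySem.Dict.values (goB lt (w.foldl (fun d c => d.insert c (d.getD c 0 + 1)) PySem.Dict.empty) []).1).any (fun v => decide (v ≠ 0))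
      = ((PySem.Dict.counter w).keys.any (fun c => decide (¬ (w.count c ≤ lt.count c)))) := by
    rw [PySem.Dict.values_eq_map_keys _ hnodup 0, List.any_map]
    rw [hkeys]
    apply PySem.List.any_congr_mem
    intro c hc
    simp only [Function.comp]
    simp only [h2, G_eq]
    simp only [ne_eq, decide_eq_decide, Int.natCast_eq_zero]
    omega
  rw [hvals]
  by_cases hcond : ∀ c ∈ w, w.count c ≤ lt.count c
  · rw [if_pos hcond]
    have : ((PySem.Dict.counter w).keys.any (fun c => decide (¬ (w.count c ≤ lt.count c)))) = false := by
      simp only [List.any_eq_false]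
      intro c hc
      simp only [decide_eq_true_eq] at *
      rw [PySem.Dict.keys_counter] at hc
      exact fun h => h (hcond c ((PySem.Set.mem_ofList _ _).mp hc))
    rw [this]
    simp only [Bool.false_eq_true, if_false, h1, List.nil_append]
  · rw [if_neg hcond]
    have : ((PySem.Dict.counter w).keys.any (fun c => decide (¬ (w.count c ≤ lt.count c)))) = true := by
      simp only [List.any_eq_true]
      simp only [not_forall, exists_prop, not_le] at hcond
      rcases hcond with ⟨c, hcw, hgt⟩
      refine ⟨c, ?_, by simp; omega⟩
      rw [PySem.Dict.keys_counter]
      exact (PySem.Set.mem_ofList _ _).mpr hcw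
    rw [this]
    simp

-- ===== VERDICT (by name: the statement is the Claim_ definition above) =====
theorem getRemainingLetters_spec : Claim_equal_getRemainingLetters := by
  intro letters word _
  unfold Spec_getRemainingLetters getRemainingLetters
  rw [alt_eq]
  by_cases hcond : ∀ c ∈ word.toList, word.toList.count c ≤ letters.toList.count c
  · rw [goA_some word.toList letters.toList hcond, if_pos hcond]; rfl
  · rw [goA_none word.toList letters.toList hcond, if_neg hcond]; rfl
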